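-- pv_equiv track=rewrite | github.com/bourne015/codebak | exercise/lc/tag/bit/2.py | twofunc
-- ===== SOURCE A (Python) =====
-- def twofunc(a):
--     if a < 0:
--         return False
--     while a > 0:
--         if a & 0x1:
--             if a > 0x1:
--                 return False
--         a = a>>1
--     return True
-- ===== SOURCE B (Python) =====
-- def twofunc(a):
--     return a >= 0 and (a & (a - 1)) == 0
-- ===== Notes on version B (the rewrite author's own statement) =====
-- stated objective: idiomatic
-- what changed: Replaced the bit-by-bit while loop with the closed-form power-of-two test using the bit trick n&(n-1), guarded by nonnegativity.
import Mathlib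
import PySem

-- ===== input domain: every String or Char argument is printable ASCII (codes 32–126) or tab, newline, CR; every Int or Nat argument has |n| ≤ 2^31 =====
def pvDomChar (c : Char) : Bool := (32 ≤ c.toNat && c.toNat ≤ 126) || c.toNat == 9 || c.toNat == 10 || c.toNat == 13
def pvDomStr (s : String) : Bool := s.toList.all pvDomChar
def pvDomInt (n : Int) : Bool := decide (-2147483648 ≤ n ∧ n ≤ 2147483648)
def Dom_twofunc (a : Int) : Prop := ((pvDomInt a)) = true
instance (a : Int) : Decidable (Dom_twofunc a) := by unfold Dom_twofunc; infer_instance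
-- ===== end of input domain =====

-- B replaces A's bit-by-bit while loop with the closed-form power-of-two test
-- `a >= 0 and (a & (a - 1)) == 0` (idiomatic; a single boolean expression, no loop).

-- ===== PORT A =====
-- termination helper for the while loop: right-shifting a positive int decreases its toNat
theorem twofuncShift_lt (a : Int) (h : 0 < a) : (Int.shiftRight a 1).toNat < a.toNat := by
  cases a with
  | ofNat n =>
    show ((n >>> 1 : Nat) : Int).toNat < (Int.ofNat n).toNat
    have e1 : (Int.ofNat n).toNat = n := rfl
    have e2 : ((n >>> 1 : Nat) : Int).toNat = n >>> 1 := Int.toNat_natCast _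
    rw [e1, e2, Nat.shiftRight_succ, Nat.shiftRight_zero]
    have hofn : Int.ofNat n = (n : Int) := rfl
    rw [hofn] at h
    have : 0 < n := by exact_mod_cast h
    omega
  | negSucc n => exact absurd h (by simp)

-- the `while a > 0` loop of A, step for step
def twofuncLoop (a : Int) : Bool :=
  if h : a > 0 then
    if Int.land a 1 ≠ 0 then
      if a > 1 then false
      else twofuncLoop (Int.shiftRight a 1)
    else twofuncLoop (Int.shiftRight a 1)
  else true
termination_by a.toNat
decreasing_by all_goals exact twofuncShift_lt a h

def twofunc (a : Int) : Bool :=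
  if a < 0 then false else twofuncLoop a

-- ===== PORT B =====
def twofunc_alt (a : Int) : Bool :=
  decide (a ≥ 0) && (Int.land a (a - 1) == 0)

-- ===== PRECONDITION & SPEC =====
def Spec_twofunc (a : Int) (out : Bool) : Prop := out = twofunc_alt a
instance (a : Int) (out : Bool) : Decidable (Spec_twofunc a out) := by unfold Spec_twofunc; infer_instance

-- ===== CLAIM (what is proved, stated in full; the proofs are below) =====
def Claim_equal_twofunc : Prop := ∀ (a : Int), Dom_twofunc a → Spec_twofunc a (twofunc a)

-- ===== LEMMAS AND PROOFS =====

theorem land_cast (m n : Nat) : Int.land (m : Int) (n : Int) = ((m &&& n : Nat) : Int) := rfl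

theorem shift_cast (n : Nat) : Int.shiftRight (n : Int) 1 = ((n >>> 1 : Nat) : Int) := rfl

theorem bit_false (m : Nat) : Nat.bit false m = 2 * m := by simp [Nat.bit]
theorem bit_true (m : Nat) : Nat.bit true m = 2 * m + 1 := by simp [Nat.bit]

-- odd n > 1:  (2m+1) &&& (2m) = 2m
theorem land_odd (m : Nat) : (2 * m + 1) &&& (2 * m) = 2 * m := by
  have h := Nat.land_bit true m false m
  simp only [bit_true, bit_false, Bool.and_false] at h
  simpa using h

-- even n > 0:  (2m) &&& (2m-1) = 2*(m &&& (m-1))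
theorem land_even (m : Nat) (hm : 1 ≤ m) : (2 * m) &&& (2 * m - 1) = 2 * (m &&& (m - 1)) := by
  have h := Nat.land_bit false m true (m - 1)
  simp only [bit_true, bit_false, Bool.false_and] at h
  have e : 2 * m - 1 = 2 * (m - 1) + 1 := by omega
  rw [e]
  simpa using h

theorem loop_eq (n : Nat) : twofuncLoop (n : Int) = ((n &&& (n - 1)) == 0) := by
  induction n using Nat.strong_induction_on with
  | _ n ih =>
    rcases Nat.eq_zero_or_pos n with h0 | hpos
    · subst h0
      rw [twofuncLoop]
      simp
    · rw [twofuncLoop]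
      have hgt : ((n : Int) > 0) := by exact_mod_cast hpos
      rw [dif_pos hgt]
      rw [show (1 : Int) = ((1 : Nat) : Int) from rfl, land_cast, shift_cast,
        Nat.and_one_is_mod]
      rcases Nat.even_or_odd n with ⟨m, hm⟩ | ⟨m, hm⟩
      · -- n = 2m, m ≥ 1
        have hm' : n = 2 * m := by omega
        have hm1 : 1 ≤ m := by omega
        have hmod : n % 2 = 0 := by omega
        rw [hmod]
        simp only [Nat.cast_zero, ne_eq, not_true_eq_false, if_false]
        have hs : n >>> 1 = m := by
          simp [Nat.shiftRight_succ, Nat.shiftRight_zero]; omega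
        rw [hs, ih m (by omega), hm', land_even m hm1]
        rcases Nat.eq_zero_or_pos (m &&& (m - 1)) with h | h
        · simp [h]
        · simp [Nat.pos_iff_ne_zero.mp h]
      · -- n = 2m + 1
        have hmod : n % 2 = 1 := by omega
        rw [hmod]
        simp only [Nat.cast_one, ne_eq, one_ne_zero, not_false_eq_true, if_true]
        rcases Nat.eq_zero_or_pos m with hm0 | hm1
        · -- n = 1
          have h1 : n = 1 := by omega
          subst h1
          have hng : ¬ (((1 : Nat) : Int) > 1) := by norm_num
          rw [if_neg hng]
          have hs : (1 : Nat) >>> 1 = 0 := rfl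
          rw [hs, ih 0 (by omega)]
          simp
        · -- n odd, n > 1
          have : ((n : Int) > 1) := by exact_mod_cast (by omega : n > 1)
          rw [if_pos this, hm, show 2 * m + 1 - 1 = 2 * m from by omega, land_odd]
          have : 2 * m ≠ 0 := by omega
          simp [this]

theorem int_beq_zero (k : Nat) : (((k : Nat) : Int) == 0) = (k == 0) := by
  rcases Nat.eq_zero_or_pos k with h | h
  · subst h; rfl
  · have h1 : ((k : Int)) ≠ 0 := by exact_mod_cast Nat.pos_iff_ne_zero.mp h
    have h2 : k ≠ 0 := by omega
    simp [h2]

theorem land_zero_neg_one : Int.land 0 (-1) = 0 := by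
  show ((Nat.bitwise (fun a b => a && !b) 0 0 : Nat) : Int) = 0
  simp

-- ===== VERDICT (by name: the statement is the Claim_ definition above) =====
theorem twofunc_spec : Claim_equal_twofunc := by
  intro a _
  unfold Spec_twofunc twofunc twofunc_alt
  cases a with
  | ofNat n =>
    have hofn : Int.ofNat n = (n : Int) := rfl
    rw [hofn]
    have hnn : ¬ (((n : Nat) : Int) < 0) := by
      have := Int.natCast_nonneg n; omega
    rw [if_neg hnn]
    have hge : decide (((n : Nat) : Int) ≥ 0) = true := by
      simp only [decide_eq_true_eq]; omega
    rw [hge, Bool.true_and]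
    cases n with
    | zero =>
      show twofuncLoop ((0 : Nat) : Int) = (Int.land 0 (0 - 1) == 0)
      rw [loop_eq]
      norm_num [land_zero_neg_one]
    | succ k =>
      have e : (((k + 1 : Nat)) : Int) - 1 = ((k : Nat) : Int) := by
        push_cast; ring
      rw [e]
      show twofuncLoop (((k + 1 : Nat)) : Int) = (Int.land ((k + 1 : Nat) : Int) ((k : Nat) : Int) == 0)
      rw [loop_eq, land_cast, show (k + 1) - 1 = k from rfl, int_beq_zero]
  | negSucc n =>
    have hlt : (Int.negSucc n) < 0 := Int.negSucc_lt_zero n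
    rw [if_pos hlt]
    simp [not_le.mpr hlt]
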